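-- pv_equiv track=rewrite | github.com/Hyun010/algorithm | 프로그래머스/3/150367. 표현 가능한 이진트리/표현 가능한 이진트리.py | solution
-- ===== SOURCE A (Python) =====
-- def solution(numbers):
--     def can_form_tree(binary_str):
--         """ 주어진 이진 문자열이 포화 이진트리 구조를 가질 수 있는지 확인 """
--         n = len(binary_str)
--         root_idx = n // 2 #루트노드 가운데 인덱스
--         root = binary_str[root_idx] #루트노드
--         #루트=0->자식 1=>불가능
--         if root == '0' and '1' in binary_str:
--             return False
--         #길이가 1=>바로 가능
--         if n == 1:
--             return True
--         #왼쪽 서브트리와 오른쪽 서브트리 확인(재귀)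
--         return can_form_tree(binary_str[:root_idx]) and can_form_tree(binary_str[root_idx+1:])
--
--     def get_full_binary(num):
--         """ 숫자를 이진수로 변환하고 포화 이진트리 형태로 변환 """
--         binary_str = bin(num)[2:] #숫자를 이진수로 변환(앞 '0b' 제거)
--         #포화 이진트리를 만족하는 길이 찾기 (2^h - 1 꼴)
--         length = 1
--         while length < len(binary_str):
--             length = length * 2 + 1
--         #앞쪽에 '0'을 추가하여 포화 이진트리 형태 맞추기
--         return binary_str.zfill(length)
--     answer = []
--     for num in numbers:
--         full_binary = get_full_binary(num)
--         answer.append(1 if can_form_tree(full_binary) else 0)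
--     return answer
-- ===== SOURCE B (Python) =====
-- def solution(numbers):
--     def check(num):
--         bs = bin(num)[2:]
--         L = (1 << len(bs).bit_length()) - 1
--         s = bs.rjust(L, '0')
--         stack = [(0, L, False)]
--         while stack:
--             lo, hi, z = stack.pop()
--             if lo >= hi:
--                 continue
--             mid = (lo + hi) // 2
--             c = s[mid]
--             if c == '1' and z:
--                 return 0
--             z2 = z or c == '0'
--             stack.append((lo, mid, z2))
--             stack.append((mid + 1, hi, z2))
--         return 1
--     return [check(num) for num in numbers]
-- ===== Notes on version B (the rewrite author's own statement) =====
-- stated objective: alternative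
-- what changed: Replaces the slicing recursion (each level copies substrings and rescans them with ''1' in s') by an explicit-stack index traversal that propagates a zero-ancestor flag, so no substring is copied or rescanned, and computes the padded length 2^h-1 by bit_length instead of a doubling loop; it trades A's recursion-plus-scan for a flat stack loop with the same result.
import Mathlib
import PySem

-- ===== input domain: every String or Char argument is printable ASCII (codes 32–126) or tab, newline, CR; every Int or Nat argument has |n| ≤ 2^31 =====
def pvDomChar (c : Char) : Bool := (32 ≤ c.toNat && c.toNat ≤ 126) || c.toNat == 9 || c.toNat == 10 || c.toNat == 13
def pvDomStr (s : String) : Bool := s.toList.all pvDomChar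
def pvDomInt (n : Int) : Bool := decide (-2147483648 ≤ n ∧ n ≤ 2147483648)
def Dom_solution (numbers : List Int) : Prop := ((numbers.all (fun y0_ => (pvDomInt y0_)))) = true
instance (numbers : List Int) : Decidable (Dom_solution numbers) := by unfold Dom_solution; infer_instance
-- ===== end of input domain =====

-- B replaces A's slicing recursion by an explicit-stack index traversal with a
-- propagated zero-ancestor flag (no substring copies or rescans) and computes the
-- padded length by bit_length; same return value on every input (negatives included).

-- shared port of the builtin bin(num)[2:] used identically by both Pythons
-- (for num < 0, Python's bin(num)[2:] keeps the 'b' of '-0b…'; ported exactly)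
def natBin (n : Nat) : List Char :=
  if n = 0 then [] else natBin (n / 2) ++ [if n % 2 = 1 then '1' else '0']

def binDigits (n : Nat) : List Char :=
  let d := natBin n
  if d = [] then ['0'] else d

def pyBin2 (num : Int) : List Char :=
  if num < 0 then 'b' :: binDigits (-num).toNat else binDigits num.toNat

-- ===== PORT A =====
def canFormTree (s : List Char) : Bool :=
  if h : s = [] then true  -- totality guard only: A raises IndexError here; never reached from solution
  else
    let n := s.length
    let rootIdx := n / 2
    let root := s.getD rootIdx ' '
    if root = '0' && s.contains '1' then false
    else if n = 1 then true
    else canFormTree (s.take rootIdx) && canFormTree (s.drop (rootIdx + 1))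
termination_by s.length
decreasing_by
  all_goals
    have : 0 < s.length := List.length_pos_iff.mpr h
    simp [List.length_take, List.length_drop]
    omega

def padLen (length n : Nat) : Nat :=
  if length < n then padLen (2 * length + 1) n else length
termination_by n - length
decreasing_by omega

-- zfill on a sign-free string: left-pad with '0' (exact here: the strings never start with '+'/'-')
def zfill (s : List Char) (w : Nat) : List Char :=
  List.replicate (w - s.length) '0' ++ s

def getFullBinary (num : Int) : List Char :=
  let bs := pyBin2 num
  zfill bs (padLen 1 bs.length)

def solution (numbers : List Int) : List Int :=
  numbers.foldl (fun answer num =>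
    answer ++ [if canFormTree (getFullBinary num) then (1 : Int) else 0]) []

-- ===== PORT B =====
def runStack (s : List Char) (stack : List (Nat × Nat × Bool)) : Bool :=
  match stack with
  | [] => true
  | (lo, hi, z) :: rest =>
    if lo ≥ hi then runStack s rest
    else
      let mid := (lo + hi) / 2
      let c := s.getD mid ' '
      if c = '1' && z then false
      else
        let z2 := z || decide (c = '0')
        runStack s ((mid + 1, hi, z2) :: (lo, mid, z2) :: rest)
termination_by (stack.map (fun p => 2 * (p.2.1 - p.1) + 1)).sum
decreasing_by all_goals (simp [List.map_cons, List.sum_cons]; try omega)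

def checkNum (num : Int) : Int :=
  let bs := pyBin2 num
  let L := (1 <<< Nat.size bs.length) - 1
  let s := List.replicate (L - bs.length) '0' ++ bs   -- rjust(L, '0')
  if runStack s [(0, L, false)] then 1 else 0

def solution_alt (numbers : List Int) : List Int :=
  numbers.map checkNum

-- ===== PRECONDITION & SPEC =====
def Spec_solution (numbers : List Int) (out : List Int) : Prop := out = solution_alt numbers
instance (numbers : List Int) (out : List Int) : Decidable (Spec_solution numbers out) := by unfold Spec_solution; infer_instance

-- ===== CLAIM (what is proved, stated in full; the proofs are below) =====
def Claim_equal_solution : Prop := ∀ (numbers : List Int), Dom_solution numbers → Spec_solution numbers (solution numbers)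

-- ===== LEMMAS AND PROOFS =====

-- proof-only helper: A's recursion with B's zero-ancestor flag threaded through
def check1 (t : List Char) (z : Bool) : Bool :=
  if h : t = [] then true
  else
    let m := t.length / 2
    let c := t.getD m ' '
    if c = '1' && z then false
    else
      let z2 := z || decide (c = '0')
      check1 (t.take m) z2 && check1 (t.drop (m + 1)) z2
termination_by t.length
decreasing_by
  all_goals
    have : 0 < t.length := List.length_pos_iff.mpr h
    simp [List.length_take, List.length_drop]
    omega

theorem check1_cons (t : List Char) (z : Bool) (h : t ≠ []) :
    check1 t z =
      (if t.getD (t.length / 2) ' ' = '1' && z then false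
       else
         check1 (t.take (t.length / 2)) (z || decide (t.getD (t.length / 2) ' ' = '0')) &&
         check1 (t.drop (t.length / 2 + 1)) (z || decide (t.getD (t.length / 2) ' ' = '0'))) := by
  rw [check1]
  simp [h]

theorem runStack_cons (s : List Char) (lo hi : Nat) (z : Bool)
    (rest : List (Nat × Nat × Bool)) (h : ¬ lo ≥ hi) :
    runStack s ((lo, hi, z) :: rest) =
      (if s.getD ((lo + hi) / 2) ' ' = '1' && z then false
       else
         runStack s (((lo + hi) / 2 + 1, hi, z || decide (s.getD ((lo + hi) / 2) ' ' = '0')) ::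
           (lo, (lo + hi) / 2, z || decide (s.getD ((lo + hi) / 2) ' ' = '0')) :: rest)) := by
  rw [runStack]
  simp [h]

theorem runStack_frame : ∀ (d : Nat) (s : List Char) (lo hi : Nat) (z : Bool)
    (rest : List (Nat × Nat × Bool)), hi - lo ≤ d → hi ≤ s.length →
    runStack s ((lo, hi, z) :: rest) =
      (check1 ((s.drop lo).take (hi - lo)) z && runStack s rest) := by
  intro d
  induction d with
  | zero =>
    intro s lo hi z rest hd hs
    have h0 : hi - lo = 0 := by omega
    rw [runStack, if_pos (by omega), h0]
    simp [check1]
  | succ d ih =>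
    intro s lo hi z rest hd hs
    by_cases hge : lo ≥ hi
    · rw [runStack, if_pos hge]
      have h0 : hi - lo = 0 := by omega
      rw [h0]
      simp [check1]
    · have hlt : lo < hi := by omega
      set t := (s.drop lo).take (hi - lo) with ht
      have hlen : t.length = hi - lo := by
        rw [ht]; simp [List.length_take, List.length_drop]; omega
      have htne : t ≠ [] := by
        intro hnil; rw [hnil] at hlen; simp at hlen; omega
      have hgetd : t.getD ((hi - lo) / 2) ' ' = s.getD ((lo + hi) / 2) ' ' := by
        rw [ht]
        rw [List.getD_eq_getElem _ ' ' (by simp [List.length_take, List.length_drop]; omega),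
            List.getD_eq_getElem s ' ' (by omega)]
        simp only [List.getElem_take, List.getElem_drop]
        congr 1
        omega
      have htake : t.take ((hi - lo) / 2) = (s.drop lo).take ((lo + hi) / 2 - lo) := by
        rw [ht, List.take_take]
        congr 1
        omega
      have hdrop : t.drop ((hi - lo) / 2 + 1) =
          (s.drop ((lo + hi) / 2 + 1)).take (hi - ((lo + hi) / 2 + 1)) := by
        rw [ht, List.drop_take, List.drop_drop]
        congr 1
        · omega
        · congr 1
          omega
      rw [runStack_cons s lo hi z rest hge, check1_cons t z htne, hlen, hgetd, htake, hdrop]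
      cases hB : (decide (s.getD ((lo + hi) / 2) ' ' = '1') && z) with
      | true => simp
      | false =>
        simp only [Bool.false_eq_true, if_false]
        rw [ih s ((lo + hi) / 2 + 1) hi _ _ (by omega) hs,
            ih s lo ((lo + hi) / 2) _ rest (by omega) (by omega)]
        cases check1 ((s.drop lo).take ((lo + hi) / 2 - lo)) (z || decide (s.getD ((lo + hi) / 2) ' ' = '0')) <;>
          cases check1 ((s.drop ((lo + hi) / 2 + 1)).take (hi - ((lo + hi) / 2 + 1))) (z || decide (s.getD ((lo + hi) / 2) ' ' = '0')) <;>
          cases runStack s rest <;> rfl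

theorem canFormTree_cons (t : List Char) (h : t ≠ []) :
    canFormTree t =
      (if t.getD (t.length / 2) ' ' = '0' && t.contains '1' then false
       else if t.length = 1 then true
       else canFormTree (t.take (t.length / 2)) && canFormTree (t.drop (t.length / 2 + 1))) := by
  rw [canFormTree]
  simp [h]

theorem check1_eq : ∀ (d : Nat) (t : List Char) (z : Bool), t.length ≤ d →
    check1 t z = (canFormTree t && !(z && t.contains '1')) := by
  intro d
  induction d with
  | zero =>
    intro t z hd
    have ht0 : t = [] := by
      cases t with
      | nil => rfl
      | cons a l => simp at hd
    subst ht0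
    simp [check1, canFormTree]
  | succ d ih =>
    intro t z hd
    by_cases hne : t = []
    · subst hne; simp [check1, canFormTree]
    · have hlp : 0 < t.length := List.length_pos_iff.mpr hne
      set m := t.length / 2 with hm
      set c := t.getD m ' ' with hc
      have hmlt : m < t.length := by omega
      have hcel : c = t[m]'hmlt := by rw [hc, List.getD_eq_getElem t ' ' hmlt]
      have hsplit : t = t.take m ++ c :: t.drop (m + 1) := by
        conv_lhs => rw [← List.take_append_drop m t]
        congr 1
        rw [hcel]
        exact List.drop_eq_getElem_cons hmlt
      have hcont : (t.contains '1') =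
          (('1' == c) || (t.take m).contains '1' || (t.drop (m + 1)).contains '1') := by
        conv_lhs => rw [hsplit]
        simp only [List.contains_append, List.contains_cons]
        cases ('1' == c) <;> cases (t.take m).contains '1' <;>
          cases (t.drop (m + 1)).contains '1' <;> rfl
      rw [check1_cons t z hne, canFormTree_cons t hne, ← hm, ← hc]
      by_cases h1 : t.length = 1
      · have hm0 : m = 0 := by omega
        have htk : t.take m = [] := by rw [hm0, List.take_zero]
        have hdr : t.drop (m + 1) = [] := by
          apply List.drop_eq_nil_of_le
          omega
        rw [htk, hdr] at hcont ⊢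
        rw [hcont]
        have hcf : canFormTree [] = true := by simp [canFormTree]
        have hnil : ∀ zz : Bool, check1 [] zz = true := by intro zz; simp [check1]
        rw [hcf]
        simp only [hnil]
        by_cases h0 : c = '0'
        · by_cases hone : c = '1'
          · exact absurd (h0 ▸ hone) (by decide)
          · simp only [h0]; cases z <;> simp [h1]
        · by_cases hone : c = '1'
          · simp only [hone]; cases z <;> simp [h1]
          · have hbeq : ('1' == c) = false := beq_eq_false_iff_ne.mpr (Ne.symm hone)
            cases z <;> simp [h0, hone, hbeq, h1]
      · rw [ih (t.take m) _ (by simp [List.length_take]; omega),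
            ih (t.drop (m + 1)) _ (by simp [List.length_drop]; omega), hcont]
        clear hcont hsplit hcel hd ih
        by_cases h0 : c = '0'
        · by_cases hone : c = '1'
          · exact absurd (h0 ▸ hone) (by decide)
          · simp only [h0]
            cases z <;> cases hl1 : (t.take m).contains '1' <;>
              cases hl2 : (t.drop (m + 1)).contains '1' <;>
              cases hA : canFormTree (t.take m) <;> cases hB : canFormTree (t.drop (m + 1)) <;>
              simp [h1]
        · by_cases hone : c = '1'
          · simp only [hone]
            cases z <;> cases hl1 : (t.take m).contains '1' <;>
              cases hl2 : (t.drop (m + 1)).contains '1' <;>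
              cases hA : canFormTree (t.take m) <;> cases hB : canFormTree (t.drop (m + 1)) <;>
              simp [h1]
          · have hbeq : ('1' == c) = false := beq_eq_false_iff_ne.mpr (Ne.symm hone)
            cases z <;> cases hl1 : (t.take m).contains '1' <;>
              cases hl2 : (t.drop (m + 1)).contains '1' <;>
              cases hA : canFormTree (t.take m) <;> cases hB : canFormTree (t.drop (m + 1)) <;>
              simp [h0, hone, hbeq, h1]

theorem padLen_stop (l n j : Nat) (hl : l = 2 ^ j - 1) (hge : ¬ l < n) :
    padLen l n = 2 ^ (max j (Nat.size n)) - 1 := by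
  have h1 : 1 ≤ 2 ^ j := Nat.one_le_two_pow
  have hsz : Nat.size n ≤ j := Nat.size_le.mpr (by omega)
  rw [padLen, if_neg hge, Nat.max_eq_left hsz, hl]

theorem padLen_eq : ∀ (d l n j : Nat), n - l ≤ d → 1 ≤ j → l = 2 ^ j - 1 → 1 ≤ n →
    padLen l n = 2 ^ (max j (Nat.size n)) - 1 := by
  intro d
  induction d with
  | zero =>
    intro l n j hd hj hl hn
    exact padLen_stop l n j hl (by omega)
  | succ d ih =>
    intro l n j hd hj hl hn
    by_cases hlt : l < n
    · have h1 : 1 ≤ 2 ^ j := Nat.one_le_two_pow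
      have hp : 2 ^ (j + 1) = 2 * 2 ^ j := by ring
      rw [padLen, if_pos hlt]
      have h2 : 2 * l + 1 = 2 ^ (j + 1) - 1 := by omega
      have hjlt : j < Nat.size n := Nat.lt_size.mpr (by omega)
      rw [ih (2 * l + 1) n (j + 1) (by omega) (by omega) h2 hn]
      have hmax : max (j + 1) (Nat.size n) = max j (Nat.size n) := by omega
      rw [hmax]
    · exact padLen_stop l n j hl hlt

theorem binDigits_ne_nil (n : Nat) : binDigits n ≠ [] := by
  unfold binDigits
  cases h : natBin n <;> simp

theorem pyBin2_len_pos (num : Int) : 1 ≤ (pyBin2 num).length := by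
  unfold pyBin2
  split
  · simp
  · have := binDigits_ne_nil num.toNat
    cases h : binDigits num.toNat with
    | nil => exact absurd h this
    | cons a l => simp

theorem checkNum_eq (num : Int) :
    checkNum num = (if canFormTree (getFullBinary num) then (1 : Int) else 0) := by
  have hL0 : 1 ≤ (pyBin2 num).length := pyBin2_len_pos num
  have hsz : 1 ≤ Nat.size (pyBin2 num).length := Nat.size_pos.mpr (by omega)
  have hP : padLen 1 (pyBin2 num).length = 2 ^ Nat.size (pyBin2 num).length - 1 := by
    rw [padLen_eq (pyBin2 num).length 1 (pyBin2 num).length 1 (by omega) (by omega) (by norm_num) hL0,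
        Nat.max_eq_right hsz]
  have hlt : (pyBin2 num).length < 2 ^ Nat.size (pyBin2 num).length := Nat.lt_size_self _
  simp only [checkNum, getFullBinary, zfill, Nat.one_shiftLeft, hP]
  set L := 2 ^ Nat.size (pyBin2 num).length - 1 with hLdef
  set s := List.replicate (L - (pyBin2 num).length) '0' ++ pyBin2 num with hs
  have hslen : s.length = L := by
    rw [hs]; simp [List.length_append, List.length_replicate]; omega
  rw [runStack_frame L s 0 L false [] (by omega) (by omega)]
  have hrs : runStack s [] = true := by rw [runStack]
  rw [hrs]
  have htk : ((s.drop 0).take (L - 0)) = s := by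
    simp only [List.drop_zero, Nat.sub_zero]
    exact List.take_of_length_le (by omega)
  have hck : check1 s false = canFormTree s := by
    rw [check1_eq s.length s false (le_refl _)]
    simp
  simp only [htk, hck, Bool.and_true]

theorem foldl_append_eq_map :
    ∀ (l : List Int) (acc : List Int),
      l.foldl (fun a num => a ++ [if canFormTree (getFullBinary num) then (1 : Int) else 0]) acc
        = acc ++ l.map (fun num => if canFormTree (getFullBinary num) then (1 : Int) else 0) := by
  intro l
  induction l with
  | nil => simp
  | cons x xs ih => intro acc; simp [List.foldl_cons, ih]

-- ===== VERDICT (by name: the statement is the Claim_ definition above) =====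
theorem solution_spec : Claim_equal_solution := by
  intro numbers _
  unfold Spec_solution solution solution_alt
  rw [foldl_append_eq_map numbers []]
  simp only [List.nil_append]
  congr 1
  funext num
  exact (checkNum_eq num).symm
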